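-- pv_equiv track=rewrite | github.com/hswek/algorithm | 프로그래머스/4/49995. 쿠키 구입/쿠키 구입.py | solution
-- ===== SOURCE A (Python) =====
-- def solution(cookie):
--     answer = 0
--     for mid in range(len(cookie)-1):
--         d={}
--         left_sum=0
--         for left in range(mid,-1,-1):
--             left_sum+=cookie[left]
--             d[left_sum]=True
--         right_sum=0
--         for right in range(mid+1,len(cookie)):
--             right_sum+=cookie[right]
--             if right_sum in d:
--                 answer=max(answer,right_sum)
--     return answer
-- ===== SOURCE B (Python) =====
-- def _max_common(xs, ys):
--     # xs, ys sorted descending; largest common element, walking both from the top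
--     i = j = 0
--     while i < len(xs) and j < len(ys):
--         if xs[i] == ys[j]:
--             return xs[i]
--         if xs[i] > ys[j]:
--             i += 1
--         else:
--             j += 1
--     return None
--
--
-- def solution(cookie):
--     n = len(cookie)
--     prefix = [0]
--     for c in cookie:
--         prefix.append(prefix[-1] + c)
--     best = 0
--     for mid in range(n - 1):
--         lefts = sorted((prefix[mid + 1] - prefix[l] for l in range(mid + 1)), reverse=True)
--         rights = sorted((prefix[r] - prefix[mid + 1] for r in range(mid + 2, n + 1)), reverse=True)
--         m = _max_common(lefts, rights)
--         if m is not None and m > best: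
--             best = m
--     return best
-- ===== Notes on version B (the rewrite author's own statement) =====
-- stated objective: alternative
-- what changed: B removes A's per-split hash dict and membership test: per split it sorts the left- and right-segment sums in descending order and finds their largest common value with a two-pointer merge walk over the two sorted lists.
import Mathlib
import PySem

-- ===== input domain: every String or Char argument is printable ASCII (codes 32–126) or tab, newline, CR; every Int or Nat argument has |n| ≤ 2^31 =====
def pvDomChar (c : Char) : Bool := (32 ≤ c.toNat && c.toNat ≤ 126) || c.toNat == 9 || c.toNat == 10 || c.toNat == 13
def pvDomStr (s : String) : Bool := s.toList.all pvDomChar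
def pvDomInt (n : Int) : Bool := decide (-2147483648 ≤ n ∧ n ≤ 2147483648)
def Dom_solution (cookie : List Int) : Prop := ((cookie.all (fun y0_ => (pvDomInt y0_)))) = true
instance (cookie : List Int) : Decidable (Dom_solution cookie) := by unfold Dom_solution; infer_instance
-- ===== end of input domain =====

-- B drops A's per-split hash dict entirely: per split it sorts the left- and right-segment
-- sums descending and finds their largest common value by a two-pointer merge walk (alternative).

-- ===== PORT A =====
def solution (cookie : List Int) : Int :=
  (PySem.List.pyRange 0 ((cookie.length : Int) - 1)).foldl (fun answer mid =>
    let dls := (PySem.List.pyRange mid (-1) (-1)).foldl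
      (fun (st : PySem.Dict Int Bool × Int) left =>
        let ls := st.2 + PySem.List.pyGetD cookie left 0
        (st.1.insert ls true, ls))
      (PySem.Dict.empty, 0)
    ((PySem.List.pyRange (mid + 1) (cookie.length : Int)).foldl
      (fun (st : Int × Int) right =>
        let rs := st.2 + PySem.List.pyGetD cookie right 0
        (if dls.1.contains rs then max st.1 rs else st.1, rs))
      (answer, 0)).1)
    0

-- ===== PORT B =====
-- Source B's _max_common: both lists sorted descending, walk both from the top by two index pointers
def maxCommonIdx (xs ys : List Int) (i j : Nat) : Option Int :=
  if h : i < xs.length ∧ j < ys.length then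
    if xs[i]'h.1 = ys[j]'h.2 then some (xs[i]'h.1)
    else if xs[i]'h.1 > ys[j]'h.2 then maxCommonIdx xs ys (i + 1) j
    else maxCommonIdx xs ys i (j + 1)
  else none
termination_by (xs.length - i) + (ys.length - j)
decreasing_by all_goals omega

def solution_alt (cookie : List Int) : Int :=
  let n : Int := cookie.length
  let pre := cookie.foldl (fun (pr : List Int) c => pr ++ [PySem.List.pyGetD pr (-1) 0 + c]) [0]
  (PySem.List.pyRange 0 (n - 1)).foldl (fun best mid =>
    let lefts := PySem.List.sorted ((PySem.List.pyRange 0 (mid + 1)).map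
        (fun l => PySem.List.pyGetD pre (mid + 1) 0 - PySem.List.pyGetD pre l 0)) (fun y => y) true
    let rights := PySem.List.sorted ((PySem.List.pyRange (mid + 2) (n + 1)).map
        (fun r => PySem.List.pyGetD pre r 0 - PySem.List.pyGetD pre (mid + 1) 0)) (fun y => y) true
    match maxCommonIdx lefts rights 0 0 with
    | some m => if m > best then m else best
    | none => best)
    0

-- ===== PRECONDITION & SPEC =====
def Spec_solution (cookie : List Int) (out : Int) : Prop := out = solution_alt cookie
instance (cookie : List Int) (out : Int) : Decidable (Spec_solution cookie out) := by unfold Spec_solution; infer_instance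

-- ===== CLAIM (what is proved, stated in full; the proofs are below) =====
def Claim_equal_solution : Prop := ∀ (cookie : List Int), Dom_solution cookie → Spec_solution cookie (solution cookie)

-- ===== LEMMAS AND PROOFS =====

-- prefix sum of the first k cookies
def pvP (cookie : List Int) (k : Nat) : Int := ((cookie.take k).sum : Int)

-- the left-hand sums A's dict collects for split point m, shifted by a start value s0
def pvLvals (cookie : List Int) (m : Nat) (s0 : Int) : List Int :=
  (List.range (m + 1)).map (fun l => s0 + (pvP cookie (m + 1) - pvP cookie l))

-- the right-hand sums seen after split point m
def pvRvals (cookie : List Int) (m : Nat) : List Int :=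
  (List.range (cookie.length - m - 1)).map
    (fun k => pvP cookie (m + 2 + k) - pvP cookie (m + 1))

lemma pvP_succ (cookie : List Int) (l : Nat) (hl : l < cookie.length) :
    pvP cookie (l + 1) = pvP cookie l + cookie.getD l 0 := by
  unfold pvP
  rw [List.take_add_one, List.sum_append, List.getElem?_eq_getElem hl]
  simp [List.getD_eq_getElem?_getD, List.getElem?_eq_getElem hl]

-- descending range
lemma pvRange_down (m : Nat) :
    PySem.List.pyRange (m : Int) (-1) (-1) =
      (List.range (m + 1)).map (fun k : Nat => (m : Int) - (k : Int)) := by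
  unfold PySem.List.pyRange
  have h1 : ((-1 : Int) < (m : Int)) := by omega
  have h0 : ¬ ((-1 : Int) = 0) := by omega
  have hp : ¬ ((0 : Int) < -1) := by omega
  simp only [if_neg h0, if_neg hp, if_pos h1]
  have h2 : (((m : Int) - -1 + - -1 - 1) / - -1) = (m : Int) + 1 := by norm_num
  rw [h2]
  have h3 : ((m : Int) + 1).toNat = m + 1 := by omega
  rw [h3]
  apply List.map_congr_left
  intro k _; ring

lemma pvRange_down_succ (m : Nat) :
    PySem.List.pyRange ((m + 1 : Nat) : Int) (-1) (-1) =
      ((m + 1 : Nat) : Int) :: PySem.List.pyRange (m : Int) (-1) (-1) := by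
  rw [pvRange_down, pvRange_down, List.range_succ_eq_map (n := m + 1), List.map_cons,
    List.map_map]
  norm_num

-- membership in the left-sum list
lemma pvMemLvals (cookie : List Int) (m : Nat) (s0 k : Int) :
    k ∈ pvLvals cookie m s0 ↔
      ∃ l, l ≤ m ∧ k = s0 + (pvP cookie (m + 1) - pvP cookie l) := by
  simp [pvLvals, List.mem_map, List.mem_range, eq_comm]

-- characterisation of A's left loop: the dict's keys
lemma pvLeftLoop (cookie : List Int) : ∀ (m : Nat), m < cookie.length →
    ∀ (d0 : PySem.Dict Int Bool) (s0 : Int) (k : Int),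
      (((PySem.List.pyRange (m : Int) (-1) (-1)).foldl
        (fun (st : PySem.Dict Int Bool × Int) left =>
          let ls := st.2 + PySem.List.pyGetD cookie left 0
          (st.1.insert ls true, ls))
        (d0, s0)).1.contains k = true)
      ↔ (d0.contains k = true ∨ k ∈ pvLvals cookie m s0) := by
  intro m
  induction m with
  | zero =>
    intro hm d0 s0 k
    have h00 : PySem.List.pyRange ((0 : Nat) : Int) (-1) (-1) = [((0 : Nat) : Int)] := by
      rw [pvRange_down]; norm_num
    rw [h00, List.foldl_cons, List.foldl_nil]
    dsimp only
    have hg : PySem.List.pyGetD cookie ((0 : Nat) : Int) 0 = pvP cookie 1 - pvP cookie 0 := by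
      rw [PySem.List.pyGetD_natCast]
      rw [show pvP cookie 1 = pvP cookie (0 + 1) from rfl, pvP_succ cookie 0 hm]
      ring
    rw [hg, PySem.Dict.contains_insert, pvMemLvals]
    simp only [Bool.or_eq_true, beq_iff_eq]
    constructor
    · rintro (rfl | h)
      · exact Or.inr ⟨0, le_refl 0, rfl⟩
      · exact Or.inl h
    · rintro (h | ⟨l, hl, rfl⟩)
      · exact Or.inr h
      · have : l = 0 := by omega
        subst this
        exact Or.inl rfl
  | succ m ih =>
    intro hm d0 s0 k
    have hm' : m < cookie.length := by omega
    rw [pvRange_down_succ, List.foldl_cons]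
    dsimp only
    rw [ih hm']
    have hg : PySem.List.pyGetD cookie ((m + 1 : Nat) : Int) 0
        = pvP cookie (m + 2) - pvP cookie (m + 1) := by
      rw [PySem.List.pyGetD_natCast]
      have h := pvP_succ cookie (m + 1) hm
      rw [show m + 1 + 1 = m + 2 from rfl] at h
      rw [h]
      ring
    rw [hg, PySem.Dict.contains_insert, pvMemLvals, pvMemLvals]
    simp only [Bool.or_eq_true, beq_iff_eq]
    constructor
    · rintro ((rfl | h) | ⟨l, hl, rfl⟩)
      · exact Or.inr ⟨m + 1, by omega, by ring⟩
      · exact Or.inl h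
      · exact Or.inr ⟨l, by omega, by ring⟩
    · rintro (h | ⟨l, hl, rfl⟩)
      · exact Or.inl (Or.inr h)
      · rcases Nat.lt_succ_iff_lt_or_eq.mp (Nat.lt_succ_of_le hl) with hl' | rfl
        · exact Or.inr ⟨l, by omega, by ring⟩
        · exact Or.inl (Or.inl (by ring))

-- characterisation of A's right loop
lemma pvRightLoop (cookie : List Int) (p : Int → Bool) :
    ∀ (fuel j : Nat), cookie.length - j = fuel → ∀ (a c : Int),
      ((PySem.List.pyRange (j : Int) (cookie.length : Int)).foldl
        (fun (st : Int × Int) right =>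
          let rs := st.2 + PySem.List.pyGetD cookie right 0
          (if p rs then max st.1 rs else st.1, rs))
        (a, c)).1
      = ((List.range (cookie.length - j)).map
          (fun k => c + (pvP cookie (j + 1 + k) - pvP cookie j))).foldl
          (fun acc v => if p v then max acc v else acc) a := by
  intro fuel
  induction fuel with
  | zero =>
    intro j hj a c
    have hge : ¬ ((j : Int) < (cookie.length : Int)) := by omega
    have hnil : PySem.List.pyRange (j : Int) (cookie.length : Int) = [] := by
      unfold PySem.List.pyRange
      simp [hge]
    have hz : cookie.length - j = 0 := hj
    rw [hnil, hz]
    simp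
  | succ fuel ih =>
    intro j hj a c
    have hlt : j < cookie.length := by omega
    have hlt' : ((j : Int) < (cookie.length : Int)) := by exact_mod_cast hlt
    rw [PySem.List.pyRange_one_cons hlt', List.foldl_cons]
    dsimp only
    have hcast : ((j : Int) + 1) = (((j + 1 : Nat)) : Int) := by push_cast; ring
    rw [hcast, ih (j + 1) (by omega)]
    have hg : PySem.List.pyGetD cookie (j : Int) 0 = pvP cookie (j + 1) - pvP cookie j := by
      rw [PySem.List.pyGetD_natCast]
      rw [pvP_succ cookie j hlt]
      ring
    rw [hg]
    have hlen : cookie.length - j = (cookie.length - (j + 1)) + 1 := by omega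
    rw [hlen, List.range_succ_eq_map, List.map_cons, List.foldl_cons, List.map_map]
    have hhead : c + (pvP cookie (j + 1 + 0) - pvP cookie j)
        = c + (pvP cookie (j + 1) - pvP cookie j) := by norm_num
    rw [hhead]
    have htail : (List.range (cookie.length - (j + 1))).map
          ((fun k => c + (pvP cookie (j + 1 + k) - pvP cookie j)) ∘ Nat.succ)
        = (List.range (cookie.length - (j + 1))).map
          (fun k => (c + (pvP cookie (j + 1) - pvP cookie j))
            + (pvP cookie (j + 1 + 1 + k) - pvP cookie (j + 1))) := by
      apply List.map_congr_left
      intro k _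
      simp only [Function.comp_apply, Nat.succ_eq_add_one]
      have hidx : j + 1 + 1 + k = j + 1 + (k + 1) := by omega
      rw [hidx]
      ring
    rw [htail]

-- B's prefix list
lemma pvP_cons (c : Int) (t : List Int) (k : Nat) : pvP (c :: t) (k + 1) = c + pvP t k := by
  simp [pvP, List.take_succ_cons]

lemma pvPrefixFoldGen : ∀ (l : List Int) (acc : List Int) (s : Int),
    PySem.List.pyGetD acc (-1) 0 = s →
    l.foldl (fun (pr : List Int) c => pr ++ [PySem.List.pyGetD pr (-1) 0 + c]) acc
    = acc ++ (List.range l.length).map (fun k => s + pvP l (k + 1)) := by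
  intro l
  induction l with
  | nil => intro acc s _; simp
  | cons c t ih =>
    intro acc s hs
    rw [List.foldl_cons, hs]
    rw [ih (acc ++ [s + c]) (s + c) (PySem.List.pyGetD_neg_one_append_singleton acc (s + c) 0)]
    have hc0 : pvP (c :: t) 1 = c := by simp [pvP]
    rw [List.length_cons, List.range_succ_eq_map, List.map_cons, List.map_map, hc0,
      List.append_assoc, List.singleton_append]
    congr 2
    apply List.map_congr_left
    intro k _
    simp only [Function.comp_apply, Nat.succ_eq_add_one, pvP_cons]
    ring

lemma pvPrefixFold (cookie : List Int) :
    cookie.foldl (fun (pr : List Int) c => pr ++ [PySem.List.pyGetD pr (-1) 0 + c]) [0]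
    = (List.range (cookie.length + 1)).map (fun k => pvP cookie k) := by
  rw [pvPrefixFoldGen cookie [0] 0 (by decide)]
  rw [List.range_succ_eq_map, List.map_cons, List.map_map]
  have h0 : pvP cookie 0 = 0 := by simp [pvP]
  rw [h0]
  simp [Function.comp, Nat.succ_eq_add_one]

lemma pvPrefixGet (cookie : List Int) (k : Nat) (hk : k ≤ cookie.length) :
    PySem.List.pyGetD ((List.range (cookie.length + 1)).map (fun k => pvP cookie k))
      (k : Int) 0 = pvP cookie k := by
  rw [PySem.List.pyGetD_natCast]
  simp [List.getD_eq_getElem?_getD, Nat.lt_succ_of_le hk]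

-- max folds
lemma pvFoldlMaxLe (u : List Int) : ∀ (a c : Int), a ≤ c → (∀ x ∈ u, x ≤ c) →
    u.foldl max a ≤ c := by
  induction u with
  | nil => intro a c ha _; exact ha
  | cons x t ih =>
    intro a c ha h
    rw [List.foldl_cons]
    exact ih (max a x) c (max_le ha (h x List.mem_cons_self))
      (fun y hy => h y (List.mem_cons_of_mem x hy))

-- list-level model of the index walk (proof helper)
def maxCommon (xs ys : List Int) : Option Int :=
  match xs, ys with
  | [], _ => none
  | _ :: _, [] => none
  | x :: xs', y :: ys' =>
    if x = y then some x
    else if x > y then maxCommon xs' (y :: ys')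
    else maxCommon (x :: xs') ys'
termination_by xs.length + ys.length

-- the index walk computes the list recursion on the dropped suffixes
lemma pvMaxCommonIdx_eq (xs ys : List Int) : ∀ (fuel i j : Nat),
    (xs.length - i) + (ys.length - j) ≤ fuel →
    maxCommonIdx xs ys i j = maxCommon (xs.drop i) (ys.drop j) := by
  intro fuel
  induction fuel with
  | zero =>
    intro i j hf
    rw [maxCommonIdx.eq_def, dif_neg (by omega : ¬ (i < xs.length ∧ j < ys.length))]
    rw [List.drop_eq_nil_of_le (by omega : xs.length ≤ i)]
    rw [maxCommon.eq_def]
  | succ fuel ih =>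
    intro i j hf
    by_cases h : i < xs.length ∧ j < ys.length
    · obtain ⟨hi, hj⟩ := h
      rw [maxCommonIdx.eq_def, dif_pos ⟨hi, hj⟩]
      rw [List.drop_eq_getElem_cons hi, List.drop_eq_getElem_cons hj]
      conv_rhs => rw [maxCommon.eq_def]
      by_cases hxy : xs[i] = ys[j]
      · simp [hxy]
      · by_cases hgt : ys[j] < xs[i]
        · simp only [if_neg hxy, if_pos hgt]
          rw [ih (i + 1) j (by omega), List.drop_eq_getElem_cons hj]
        · simp only [if_neg hxy, if_neg hgt]
          rw [ih i (j + 1) (by omega), List.drop_eq_getElem_cons hi]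
    · rw [maxCommonIdx.eq_def, dif_neg h]
      rcases not_and_or.mp h with hi | hj
      · rw [List.drop_eq_nil_of_le (by omega : xs.length ≤ i)]
        rw [maxCommon.eq_def]
      · rw [List.drop_eq_nil_of_le (by omega : ys.length ≤ j)]
        cases xs.drop i <;> rw [maxCommon.eq_def]

-- correctness of the descending two-pointer merge walk
lemma pvMaxCommon_spec : ∀ (xs ys : List Int),
    xs.Pairwise (fun a b => b ≤ a) → ys.Pairwise (fun a b => b ≤ a) →
    (maxCommon xs ys = none → ∀ z ∈ xs, z ∉ ys) ∧
    (∀ m, maxCommon xs ys = some m →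
      m ∈ xs ∧ m ∈ ys ∧ ∀ z ∈ xs, z ∈ ys → z ≤ m) := by
  intro xs
  induction xs with
  | nil =>
    intro ys _ _
    refine ⟨fun _ z hz => absurd hz (List.not_mem_nil), fun m hm => ?_⟩
    rw [maxCommon.eq_def] at hm
    simp at hm
  | cons x xs' ihx =>
    intro ys hx hy
    induction ys with
    | nil =>
      refine ⟨fun _ z _ => List.not_mem_nil, fun m hm => ?_⟩
      rw [maxCommon.eq_def] at hm
      simp at hm
    | cons y ys' ihy =>
      have hx' := (List.pairwise_cons.mp hx).2
      have hxb := (List.pairwise_cons.mp hx).1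
      have hy' := (List.pairwise_cons.mp hy).2
      have hyb := (List.pairwise_cons.mp hy).1
      by_cases hxy : x = y
      · subst hxy
        have : maxCommon (x :: xs') (x :: ys') = some x := by
          conv_lhs => rw [maxCommon.eq_def]
          simp
        refine ⟨fun h => by rw [this] at h; exact absurd h (by simp), fun m hm => ?_⟩
        rw [this, Option.some_inj] at hm
        subst hm
        refine ⟨List.mem_cons_self, List.mem_cons_self, ?_⟩
        intro z hz _
        rcases List.mem_cons.mp hz with rfl | hz'
        · exact le_refl z
        · exact hxb z hz'
      · by_cases hgt : x > y
        · have heq : maxCommon (x :: xs') (y :: ys') = maxCommon xs' (y :: ys') := by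
            conv_lhs => rw [maxCommon.eq_def]
            simp only [if_neg hxy, if_pos (show y < x from hgt)]
          have hxnot : x ∉ y :: ys' := by
            intro hxmem
            rcases List.mem_cons.mp hxmem with rfl | h
            · exact hxy rfl
            · exact absurd (hyb x h) (by omega)
          obtain ⟨ihn, ihs⟩ := ihx (y :: ys') hx' hy
          refine ⟨fun h => ?_, fun m hm => ?_⟩
          · rw [heq] at h
            intro z hz
            rcases List.mem_cons.mp hz with rfl | hz'
            · exact hxnot
            · exact ihn h z hz'
          · rw [heq] at hm
            obtain ⟨h1, h2, h3⟩ := ihs m hm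
            refine ⟨List.mem_cons_of_mem x h1, h2, ?_⟩
            intro z hz hzy
            rcases List.mem_cons.mp hz with rfl | hz'
            · exact absurd hzy hxnot
            · exact h3 z hz' hzy
        · have hlt : x < y := by omega
          have heq : maxCommon (x :: xs') (y :: ys') = maxCommon (x :: xs') ys' := by
            conv_lhs => rw [maxCommon.eq_def]
            simp only [if_neg hxy, if_neg (show ¬ y < x from by omega)]
          have hynot : y ∉ x :: xs' := by
            intro hymem
            rcases List.mem_cons.mp hymem with h | h
            · exact hxy h.symm
            · exact absurd (hxb y h) (by omega)
          obtain ⟨ihn, ihs⟩ := ihy hy'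
          refine ⟨fun h => ?_, fun m hm => ?_⟩
          · rw [heq] at h
            intro z hz hzy
            rcases List.mem_cons.mp hzy with rfl | hzy'
            · exact hynot hz
            · exact ihn h z hz hzy'
          · rw [heq] at hm
            obtain ⟨h1, h2, h3⟩ := ihs m hm
            refine ⟨h1, List.mem_cons_of_mem y h2, ?_⟩
            intro z hz hzy
            rcases List.mem_cons.mp hzy with rfl | hzy'
            · exact absurd hz hynot
            · exact h3 z hz hzy'

-- the filtered max fold equals the merge walk on the two sorted lists
lemma pvFoldFilterMax (L R : List Int) (a : Int) :
    (R.filter (fun v => decide (v ∈ L))).foldl max a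
    = (match maxCommonIdx (PySem.List.sorted L (fun y => y) true)
             (PySem.List.sorted R (fun y => y) true) 0 0 with
       | some m => if m > a then m else a
       | none => a) := by
  rw [pvMaxCommonIdx_eq _ _ ((PySem.List.sorted L (fun y => y) true).length
    + (PySem.List.sorted R (fun y => y) true).length) 0 0 (by omega)]
  rw [List.drop_zero, List.drop_zero]
  have hpL : (PySem.List.sorted L (fun y => y) true).Pairwise (fun x y => y ≤ x) :=
    PySem.List.sorted_pairwise_rev L (fun y => y)
  have hpR : (PySem.List.sorted R (fun y => y) true).Pairwise (fun x y => y ≤ x) :=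
    PySem.List.sorted_pairwise_rev R (fun y => y)
  obtain ⟨hnone, hsome⟩ := pvMaxCommon_spec _ _ hpL hpR
  cases hmc : maxCommon (PySem.List.sorted L (fun y => y) true)
      (PySem.List.sorted R (fun y => y) true) with
  | none =>
    have hfe : R.filter (fun v => decide (v ∈ L)) = [] := by
      rw [List.filter_eq_nil_iff]
      intro v hv hvl
      have hvL : v ∈ PySem.List.sorted L (fun y => y) true :=
        (PySem.List.mem_sorted _ _ _ _).mpr (by simpa using hvl)
      have hvR : v ∈ PySem.List.sorted R (fun y => y) true :=
        (PySem.List.mem_sorted _ _ _ _).mpr hv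
      exact hnone hmc v hvL hvR
    rw [hfe]
    rfl
  | some m =>
    obtain ⟨h1, h2, h3⟩ := hsome m hmc
    have hmL : m ∈ L := (PySem.List.mem_sorted _ _ _ _).mp h1
    have hmR : m ∈ R := (PySem.List.mem_sorted _ _ _ _).mp h2
    have hmw : m ∈ R.filter (fun v => decide (v ∈ L)) :=
      List.mem_filter.mpr ⟨hmR, by simpa using hmL⟩
    have hub : ∀ x ∈ R.filter (fun v => decide (v ∈ L)), x ≤ m := by
      intro x hxw
      obtain ⟨hxR, hxL⟩ := List.mem_filter.mp hxw
      exact h3 x ((PySem.List.mem_sorted _ _ _ _).mpr (by simpa using hxL))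
        ((PySem.List.mem_sorted _ _ _ _).mpr hxR)
    have hle : (R.filter (fun v => decide (v ∈ L))).foldl max a ≤ max a m :=
      pvFoldlMaxLe _ a (max a m) (le_max_left a m)
        (fun x hx => le_trans (hub x hx) (le_max_right a m))
    have hge1 : a ≤ (R.filter (fun v => decide (v ∈ L))).foldl max a :=
      (PySem.List.le_foldl_max _ a).1
    have hge2 : m ≤ (R.filter (fun v => decide (v ∈ L))).foldl max a :=
      (PySem.List.le_foldl_max _ a).2 m hmw
    have hfm : (R.filter (fun v => decide (v ∈ L))).foldl max a = max a m :=
      le_antisymm hle (max_le hge1 hge2)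
    rw [hfm]
    show max a m = if m > a then m else a
    by_cases hab : a < m
    · rw [if_pos hab, max_eq_right hab.le]
    · rw [if_neg hab, max_eq_left (not_lt.mp hab)]

-- the per-split-point equality
lemma pvMidStep (cookie : List Int) (m : Nat) (hm : m + 2 ≤ cookie.length) (a : Int) :
    ((PySem.List.pyRange ((m : Int) + 1) (cookie.length : Int)).foldl
      (fun (st : Int × Int) right =>
        let rs := st.2 + PySem.List.pyGetD cookie right 0
        (if (((PySem.List.pyRange (m : Int) (-1) (-1)).foldl
            (fun (st : PySem.Dict Int Bool × Int) left =>
              let ls := st.2 + PySem.List.pyGetD cookie left 0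
              (st.1.insert ls true, ls))
            (PySem.Dict.empty, 0)).1.contains rs) then max st.1 rs else st.1, rs))
      (a, 0)).1
    = (match maxCommonIdx (PySem.List.sorted (pvLvals cookie m 0) (fun y => y) true)
             (PySem.List.sorted (pvRvals cookie m) (fun y => y) true) 0 0 with
       | some mm => if mm > a then mm else a
       | none => a) := by
  have hm1 : m < cookie.length := by omega
  have hcont := pvLeftLoop cookie m hm1 PySem.Dict.empty 0
  simp only [PySem.Dict.contains_empty, Bool.false_eq_true, false_or] at hcont
  have hcast : ((m : Int) + 1) = ((m + 1 : Nat) : Int) := by push_cast; ring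
  rw [hcast, pvRightLoop cookie _ (cookie.length - (m + 1)) (m + 1) rfl a 0]
  have hcong := PySem.List.foldl_congr_mem
    ((List.range (cookie.length - (m + 1))).map
      (fun k => 0 + (pvP cookie (m + 1 + 1 + k) - pvP cookie (m + 1))))
    (fun acc v => if (((PySem.List.pyRange (m : Int) (-1) (-1)).foldl
        (fun (st : PySem.Dict Int Bool × Int) left =>
          let ls := st.2 + PySem.List.pyGetD cookie left 0
          (st.1.insert ls true, ls))
        (PySem.Dict.empty, 0)).1.contains v) then max acc v else acc)
    (fun acc v => if v ∈ pvLvals cookie m 0 then max acc v else acc)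
    a
    (by
      intro acc x _
      dsimp only
      by_cases h : x ∈ pvLvals cookie m 0
      · rw [if_pos ((hcont x).mpr h), if_pos h]
      · rw [if_neg (fun hc => h ((hcont x).mp hc)), if_neg h])
  rw [hcong]
  rw [PySem.List.foldl_ite_eq_foldl_filter]
  have hlist : (List.range (cookie.length - (m + 1))).map
      (fun k => 0 + (pvP cookie (m + 1 + 1 + k) - pvP cookie (m + 1))) = pvRvals cookie m := by
    unfold pvRvals
    have hn : cookie.length - (m + 1) = cookie.length - m - 1 := by omega
    rw [hn]
    apply List.map_congr_left
    intro k _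
    have hidx : m + 1 + 1 + k = m + 2 + k := by omega
    rw [hidx]
    ring
  rw [hlist]
  exact pvFoldFilterMax (pvLvals cookie m 0) (pvRvals cookie m) a

-- ===== VERDICT (by name: the statement is the Claim_ definition above) =====
theorem solution_spec : Claim_equal_solution := by
  intro cookie _
  show solution cookie = solution_alt cookie
  unfold solution solution_alt
  dsimp only
  rw [pvPrefixFold]
  apply PySem.List.foldl_congr_mem
  intro acc mid hmid
  obtain ⟨h0, h1⟩ := PySem.List.mem_pyRange_one.mp hmid
  have hmid_eq : mid = ((mid.toNat : Nat) : Int) := (Int.toNat_of_nonneg h0).symm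
  rw [hmid_eq]
  set m : Nat := mid.toNat with hmdef
  have hm2 : m + 2 ≤ cookie.length := by omega
  rw [pvMidStep cookie m hm2 acc]
  have hL : (PySem.List.pyRange 0 ((m : Int) + 1)).map
      (fun l => PySem.List.pyGetD ((List.range (cookie.length + 1)).map (fun k => pvP cookie k)) ((m : Int) + 1) 0
        - PySem.List.pyGetD ((List.range (cookie.length + 1)).map (fun k => pvP cookie k)) l 0)
      = pvLvals cookie m 0 := by
    have hc1 : ((m : Int) + 1) = ((m + 1 : Nat) : Int) := by push_cast; ring
    rw [hc1, PySem.List.pyRange_zero_natCast, List.map_map]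
    unfold pvLvals
    apply List.map_congr_left
    intro l hl
    have hl' : l < m + 1 := List.mem_range.mp hl
    simp only [Function.comp_apply]
    rw [pvPrefixGet cookie (m + 1) (by omega), pvPrefixGet cookie l (by omega)]
    ring
  have hR : (PySem.List.pyRange ((m : Int) + 2) ((cookie.length : Int) + 1)).map
      (fun r => PySem.List.pyGetD ((List.range (cookie.length + 1)).map (fun k => pvP cookie k)) r 0
        - PySem.List.pyGetD ((List.range (cookie.length + 1)).map (fun k => pvP cookie k)) ((m : Int) + 1) 0)
      = pvRvals cookie m := by
    rw [PySem.List.pyRange_of_pos ((m : Int) + 2) ((cookie.length : Int) + 1) Int.one_pos, List.map_map]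
    have hif : ((m : Int) + 2 < (cookie.length : Int) + 1) := by omega
    rw [if_pos hif]
    have hcnt : ((((cookie.length : Int) + 1) - ((m : Int) + 2) + 1 - 1) / 1).toNat
        = cookie.length - m - 1 := by omega
    rw [hcnt]
    unfold pvRvals
    apply List.map_congr_left
    intro k hk
    have hk' : k < cookie.length - m - 1 := List.mem_range.mp hk
    simp only [Function.comp_apply]
    have hc2 : ((m : Int) + 2 + 1 * (k : Int)) = ((m + 2 + k : Nat) : Int) := by push_cast; ring
    have hc3 : ((m : Int) + 1) = ((m + 1 : Nat) : Int) := by push_cast; ring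
    rw [hc2, hc3, pvPrefixGet cookie (m + 2 + k) (by omega), pvPrefixGet cookie (m + 1) (by omega)]
  rw [hL, hR]
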